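-- pv_equiv track=rewrite | github.com/Sarghe-Andrei-Vlad/Python3E3 | Lab2/main.py | stadium
-- ===== SOURCE A (Python) =====
-- def stadium(seats):
--     res = []
--     for col in range(0, len(seats[0])):
--         maxHeight = 0
--         for row in range(0, len(seats)):
--             if seats[row][col] <= maxHeight:
--                 res.append(tuple([row, col]))
--             else:
--                 maxHeight = seats[row][col]
--     else:
--         return res
-- ===== SOURCE B (Python) =====
-- def stadium(seats):
--     res = []
--     for col in range(len(seats[0])):
--         for row in range(len(seats)):
--             v = seats[row][col]
--             if v <= 0 or any(seats[r][col] >= v for r in range(row)):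
--                 res.append((row, col))
--     return res
-- ===== Notes on version B (the rewrite author's own statement) =====
-- stated objective: alternative
-- what changed: B eliminates A's running maxHeight state: for each cell it decides blockedness directly and statelessly, by testing v <= 0 or whether any earlier row in the same column holds a value >= v, trading A's single linear scan per column for a brute-force existential check per cell.
import Mathlib
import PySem

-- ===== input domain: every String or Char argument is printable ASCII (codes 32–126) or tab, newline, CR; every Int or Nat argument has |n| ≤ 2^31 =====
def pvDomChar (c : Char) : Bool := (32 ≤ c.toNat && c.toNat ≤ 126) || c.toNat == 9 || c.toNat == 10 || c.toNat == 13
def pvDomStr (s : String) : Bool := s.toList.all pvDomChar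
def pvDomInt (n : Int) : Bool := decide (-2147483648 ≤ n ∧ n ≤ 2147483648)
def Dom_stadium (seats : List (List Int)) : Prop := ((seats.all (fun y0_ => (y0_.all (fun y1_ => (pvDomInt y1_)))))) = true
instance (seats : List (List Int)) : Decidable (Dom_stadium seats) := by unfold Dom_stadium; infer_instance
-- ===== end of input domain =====

-- B drops A's running-maxHeight state entirely: each cell is tested directly against all earlier
-- rows of its column (blocked iff v ≤ 0 or some earlier seat in the column is ≥ v) — a stateless
-- brute-force formulation traded against A's scan (alternative; B is O(rows²·cols)).

-- ===== PORT A =====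
def stadium (seats : List (List Int)) : List (Int × Int) :=
  (PySem.List.pyRange 0 ((PySem.List.pyGetD seats 0 []).length : Int) 1).foldl
    (fun res col =>
      ((PySem.List.pyRange 0 (seats.length : Int) 1).foldl
        (fun (st : List (Int × Int) × Int) row =>
          if PySem.List.pyGetD (PySem.List.pyGetD seats row []) col 0 ≤ st.2 then
            (st.1 ++ [(row, col)], st.2)
          else
            (st.1, PySem.List.pyGetD (PySem.List.pyGetD seats row []) col 0))
        (res, 0)).1)
    []

-- ===== PORT B =====
def stadium_alt (seats : List (List Int)) : List (Int × Int) :=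
  (PySem.List.pyRange 0 ((PySem.List.pyGetD seats 0 []).length : Int) 1).foldl
    (fun res col =>
      (PySem.List.pyRange 0 (seats.length : Int) 1).foldl
        (fun res row =>
          let v := PySem.List.pyGetD (PySem.List.pyGetD seats row []) col 0
          if decide (v ≤ 0) ||
              (PySem.List.pyRange 0 row 1).any
                (fun r => decide (v ≤ PySem.List.pyGetD (PySem.List.pyGetD seats r []) col 0)) then
            res ++ [(row, col)]
          else res)
        res)
    []

-- ===== PRECONDITION & SPEC =====
-- Pre_ excludes exactly the inputs where A raises IndexError: empty seats (seats[0]) and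
-- jagged inputs where some row is shorter than row 0 (seats[row][col]).
def Pre_stadium (seats : List (List Int)) : Prop :=
  seats ≠ [] ∧ ∀ r ∈ seats, (seats.headD []).length ≤ r.length
instance (seats : List (List Int)) : Decidable (Pre_stadium seats) := by unfold Pre_stadium; infer_instance

def pvWitness_stadium : List (List Int) := [[1, 2], [3, 1]]

def Spec_stadium (seats : List (List Int)) (out : List (Int × Int)) : Prop := out = stadium_alt seats
instance (seats : List (List Int)) (out : List (Int × Int)) : Decidable (Spec_stadium seats out) := by unfold Spec_stadium; infer_instance

-- ===== CLAIM (what is proved, stated in full; the proofs are below) =====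
def Claim_equal_stadium : Prop := ∀ (seats : List (List Int)), Dom_stadium seats → Pre_stadium seats → Spec_stadium seats (stadium seats)

-- ===== LEMMAS AND PROOFS =====

-- v is ≤ the running max started at c iff v ≤ c or v ≤ some scanned value
lemma le_foldl_max_iff (val : Int → Int) (v : Int) :
    ∀ (l : List Int) (c : Int),
      (v ≤ l.foldl (fun m r => max m (val r)) c) ↔ (v ≤ c ∨ ∃ r ∈ l, v ≤ val r) := by
  intro l
  induction l with
  | nil => intro c; simp
  | cons x t ih =>
    intro c
    rw [List.foldl_cons, ih (max c (val x))]
    constructor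
    · rintro (h | h)
      · rcases le_max_iff.mp h with h' | h'
        · exact Or.inl h'
        · exact Or.inr ⟨x, List.mem_cons_self, h'⟩
      · exact Or.inr (by rcases h with ⟨r, hr, hv⟩; exact ⟨r, List.mem_cons_of_mem _ hr, hv⟩)
    · rintro (h | ⟨r, hr, hv⟩)
      · exact Or.inl (le_max_of_le_left h)
      · rcases List.mem_cons.mp hr with rfl | hr'
        · exact Or.inl (le_max_of_le_right hv)
        · exact Or.inr ⟨r, hr', hv⟩

-- A's inner scan over one column equals B's stateless per-cell test, and its running
-- maxHeight equals the fold of max over the scanned values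
lemma col_eq (val : Int → Int) (col : Int) :
    ∀ (n : Nat) (res : List (Int × Int)),
      ((PySem.List.pyRange 0 (n : Int) 1).foldl
          (fun (st : List (Int × Int) × Int) row =>
            if val row ≤ st.2 then (st.1 ++ [(row, col)], st.2) else (st.1, val row))
          (res, 0))
        = ((PySem.List.pyRange 0 (n : Int) 1).foldl
             (fun res row =>
               if decide (val row ≤ 0) ||
                   (PySem.List.pyRange 0 row 1).any (fun r => decide (val row ≤ val r)) then
                 res ++ [(row, col)]
               else res)
             res,
           (PySem.List.pyRange 0 (n : Int) 1).foldl (fun m r => max m (val r)) 0) := by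
  intro n
  induction n with
  | zero =>
    intro res
    rw [PySem.List.pyRange_one_eq_nil (by omega)]
    simp
  | succ k ih =>
    intro res
    have hcast : ((k + 1 : Nat) : Int) = (k : Int) + 1 := by push_cast; ring
    rw [hcast, PySem.List.pyRange_one_succ_right (by omega)]
    simp only [List.foldl_append, List.foldl_cons, List.foldl_nil, ih res]
    have hcond : (val (k : Int) ≤ (PySem.List.pyRange 0 (k : Int) 1).foldl (fun m r => max m (val r)) 0)
        ↔ (decide (val (k : Int) ≤ 0) ||
            (PySem.List.pyRange 0 (k : Int) 1).any (fun r => decide (val (k : Int) ≤ val r))) = true := by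
      rw [le_foldl_max_iff]
      simp
    by_cases h : val (k : Int) ≤ (PySem.List.pyRange 0 (k : Int) 1).foldl (fun m r => max m (val r)) 0
    · rw [if_pos h, if_pos (hcond.mp h)]
      exact Prod.ext rfl (by dsimp; omega)
    · rw [if_neg h, if_neg (by rw [← hcond]; exact h)]
      exact Prod.ext rfl (by dsimp; omega)

-- ===== VERDICT (by name: the statement is the Claim_ definition above) =====
theorem stadium_spec : Claim_equal_stadium := by
  intro seats _ _
  unfold Spec_stadium stadium stadium_alt
  congr 1
  funext res col
  exact congrArg Prod.fst
    (col_eq (fun row => PySem.List.pyGetD (PySem.List.pyGetD seats row []) col 0) col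
      seats.length res)
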